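-- pv_equiv track=rewrite | github.com/greggubben/AoC2021 | day24/alu.py | createSets
-- ===== SOURCE A (Python) =====
-- def createSets(instructions):
--
--     instructionSets = []
--
--     instructionSet = []
--     for instruction in instructions:
--         if instruction.startswith("inp"):
--             instructionSet = []
--             instructionSets.append(instructionSet)
--         instructionSet.append(instruction)
--
--     return instructionSets
-- ===== SOURCE B (Python) =====
-- def createSets(instructions):
--     # boundary indices of the 'inp' instructions, then slice between consecutive boundaries
--     idx = [i for i, ins in enumerate(instructions) if ins.startswith("inp")]
--     bounds = idx + [len(instructions)]
--     return [instructions[bounds[j]:bounds[j + 1]] for j in range(len(idx))]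
-- ===== Notes on version B (the rewrite author's own statement) =====
-- stated objective: alternative
-- what changed: Replaces the single mutating pass (appending a shared current-group list into the result) by a two-phase boundary computation: collect the indices of 'inp' lines, then build each group as a slice between consecutive boundaries.
import Mathlib
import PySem

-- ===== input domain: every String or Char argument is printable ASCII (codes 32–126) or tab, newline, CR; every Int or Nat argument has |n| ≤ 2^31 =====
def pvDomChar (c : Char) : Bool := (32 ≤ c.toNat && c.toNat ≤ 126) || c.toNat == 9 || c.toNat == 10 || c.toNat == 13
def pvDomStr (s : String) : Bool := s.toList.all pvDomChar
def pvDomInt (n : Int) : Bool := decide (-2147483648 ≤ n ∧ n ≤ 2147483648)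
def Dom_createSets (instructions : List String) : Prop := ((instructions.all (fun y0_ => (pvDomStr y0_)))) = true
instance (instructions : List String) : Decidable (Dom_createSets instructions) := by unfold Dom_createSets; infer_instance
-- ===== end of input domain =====

-- B replaces A's single mutating pass by boundary indices + slices; objective: alternative decomposition, same cost.

-- ===== PORT A =====
-- A appends the current group into the result BY REFERENCE and keeps mutating it; we model that
-- aliasing with state (finished groups, current group, attached?): the current group is flushed
-- into the result at the end iff it was ever attached (i.e. some "inp" was seen).
def pvStepA (s : List (List String) × List String × Bool) (instruction : String) :
    List (List String) × List String × Bool :=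
  if PySem.Str.startswith instruction "inp" then
    (if s.2.2 then s.1 ++ [s.2.1] else s.1, [instruction], true)
  else (s.1, s.2.1 ++ [instruction], s.2.2)

def createSets (instructions : List String) : List (List String) :=
  let s := instructions.foldl pvStepA ([], [], false)
  if s.2.2 then s.1 ++ [s.2.1] else s.1

-- ===== PORT B =====
def createSets_alt (instructions : List String) : List (List String) :=
  let idx : List Int := (PySem.List.enumerate instructions 0).filterMap
    (fun p => if PySem.Str.startswith p.2 "inp" then some p.1 else none)
  let bounds : List Int := idx ++ [(instructions.length : Int)]
  (List.range idx.length).map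
    (fun j => PySem.List.slice instructions (some (bounds.getD j 0)) (some (bounds.getD (j + 1) 0)))

-- ===== PRECONDITION & SPEC =====
def Spec_createSets (instructions : List String) (out : List (List String)) : Prop := out = createSets_alt instructions
instance (instructions : List String) (out : List (List String)) : Decidable (Spec_createSets instructions out) := by unfold Spec_createSets; infer_instance

-- ===== CLAIM (what is proved, stated in full; the proofs are below) =====
def Claim_equal_createSets : Prop := ∀ (instructions : List String), Dom_createSets instructions → Spec_createSets instructions (createSets instructions)

-- ===== LEMMAS AND PROOFS =====

def pvQ (s : String) : Bool := PySem.Str.startswith s "inp"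

-- the groups A and B both compute, stated structurally
def pvAux : List String → List (List String)
  | [] => []
  | x :: xs =>
    if pvQ x then (x :: xs.takeWhile (fun y => !pvQ y)) :: pvAux (xs.dropWhile (fun y => !pvQ y))
    else pvAux xs
termination_by l => l.length
decreasing_by
  · have := List.length_dropWhile_le (fun y => !pvQ y) xs; simp; omega
  · simp

def pvFinish (s : List (List String) × List String × Bool) : List (List String) :=
  if s.2.2 then s.1 ++ [s.2.1] else s.1

theorem pvA_true : ∀ (xs : List String) (acc : List (List String)) (cur : List String),
    pvFinish (xs.foldl pvStepA (acc, cur, true)) =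
      acc ++ (cur ++ xs.takeWhile (fun y => !pvQ y)) :: pvAux (xs.dropWhile (fun y => !pvQ y)) := by
  intro xs
  induction xs with
  | nil => intro acc cur; simp [pvFinish, pvAux]
  | cons x xs ih =>
    intro acc cur
    rw [List.foldl_cons]
    by_cases hq : pvQ x = true
    · have hstep : pvStepA (acc, cur, true) x = (acc ++ [cur], [x], true) := by
        simp [pvStepA, pvQ] at hq ⊢; simp [hq]
      rw [hstep, ih]
      rw [List.takeWhile_cons, List.dropWhile_cons]
      simp [hq, pvAux]
    · have hstep : pvStepA (acc, cur, true) x = (acc, cur ++ [x], true) := by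
        simp [pvStepA, pvQ] at hq ⊢; simp [hq]
      rw [hstep, ih]
      rw [List.takeWhile_cons, List.dropWhile_cons]
      simp [hq]

theorem pvA_false : ∀ (xs : List String) (acc : List (List String)) (cur : List String),
    pvFinish (xs.foldl pvStepA (acc, cur, false)) = acc ++ pvAux xs := by
  intro xs
  induction xs with
  | nil => intro acc cur; simp [pvFinish, pvAux]
  | cons x xs ih =>
    intro acc cur
    rw [List.foldl_cons]
    by_cases hq : pvQ x = true
    · have hstep : pvStepA (acc, cur, false) x = (acc, [x], true) := by
        simp [pvStepA, pvQ] at hq ⊢; simp [hq]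
      rw [hstep, pvA_true]
      simp [pvAux, hq]
    · have hstep : pvStepA (acc, cur, false) x = (acc, cur ++ [x], false) := by
        simp [pvStepA, pvQ] at hq ⊢; simp [hq]
      rw [hstep, ih]
      simp [pvAux, hq]

theorem pvA_eq_aux (xs : List String) : createSets xs = pvAux xs := by
  have := pvA_false xs [] []
  simpa [createSets, pvFinish] using this

def pvNidx : List String → List Nat
  | [] => []
  | x :: xs => if pvQ x then 0 :: (pvNidx xs).map (· + 1) else (pvNidx xs).map (· + 1)

def pvNbounds (xs : List String) : List Nat := pvNidx xs ++ [xs.length]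

def pvNB (xs : List String) : List (List String) :=
  (List.range (pvNidx xs).length).map
    (fun j => (xs.drop ((pvNbounds xs).getD j 0)).take
      ((pvNbounds xs).getD (j + 1) 0 - (pvNbounds xs).getD j 0))

theorem pvEN : ∀ (xs : List String) (s : Nat),
    (PySem.List.enumerate xs (s : Int)).filterMap
        (fun p => if PySem.Str.startswith p.2 "inp" then some p.1 else none) =
      (pvNidx xs).map (fun (n : Nat) => ((n + s : Nat) : Int)) := by
  intro xs
  induction xs with
  | nil => intro s; simp [PySem.List.enumerate_nil, pvNidx]
  | cons x xs ih =>
    intro s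
    rw [PySem.List.enumerate_cons, List.filterMap_cons]
    have h1 : ((s : Int) + 1) = ((s + 1 : Nat) : Int) := by push_cast; ring
    rw [h1, ih (s + 1)]
    by_cases hq : PySem.Str.startswith x "inp" = true
    · simp only [hq, if_pos, pvNidx, pvQ]
      simp [List.map_map, Function.comp]
      intro n _; ring
    · simp only [hq, pvNidx, pvQ]
      simp [List.map_map, Function.comp]
      intro n _; ring

theorem pvGetD_map_cast (l : List Nat) (j : Nat) :
    (l.map (fun (n : Nat) => (n : Int))).getD j 0 = ((l.getD j 0 : Nat) : Int) := by
  induction l generalizing j with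
  | nil => simp
  | cons a l ih =>
    cases j with
    | zero => rfl
    | succ j => rw [List.map_cons, List.getD_cons_succ, List.getD_cons_succ]; exact ih j

theorem pvAlt_eq_NB (xs : List String) : createSets_alt xs = pvNB xs := by
  have he : (PySem.List.enumerate xs 0).filterMap
      (fun p => if PySem.Str.startswith p.2 "inp" then some p.1 else none) =
      (pvNidx xs).map (fun (n : Nat) => (n : Int)) := by
    simpa using pvEN xs 0
  simp only [createSets_alt, pvNB, he]
  have hb : ((pvNidx xs).map (fun (n : Nat) => (n : Int))) ++ [((xs.length : Nat) : Int)] =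
      (pvNbounds xs).map (fun (n : Nat) => (n : Int)) := by
    simp [pvNbounds]
  rw [hb, List.length_map]
  apply List.map_congr_left
  intro j _
  rw [pvGetD_map_cast, pvGetD_map_cast, PySem.List.slice_natCast]

theorem pvGetD_map_succ (l : List Nat) (j : Nat) (h : j < l.length) :
    (l.map (· + 1)).getD j 0 = l.getD j 0 + 1 := by
  induction l generalizing j with
  | nil => simp at h
  | cons a l ih =>
    cases j with
    | zero => rfl
    | succ j =>
      rw [List.map_cons, List.getD_cons_succ, List.getD_cons_succ]
      exact ih j (by simpa using Nat.lt_of_succ_lt_succ h)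

theorem pvHead_take : ∀ (xs : List String),
    xs.take ((pvNbounds xs).getD 0 0) = xs.takeWhile (fun y => !pvQ y) := by
  intro xs
  induction xs with
  | nil => simp [pvNbounds, pvNidx]
  | cons x xs ih =>
    by_cases hq : pvQ x = true
    · simp [pvNbounds, pvNidx, hq]
    · have hb : (pvNbounds (x :: xs)).getD 0 0 = (pvNbounds xs).getD 0 0 + 1 := by
        simp only [pvNbounds, pvNidx, hq, if_neg, Bool.not_eq_true]
        rw [show (pvNidx xs).map (· + 1) ++ [(x :: xs).length] =
              (pvNbounds xs).map (· + 1) by simp [pvNbounds]]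
        exact pvGetD_map_succ _ 0 (by simp [pvNbounds])
      rw [hb, List.take_succ_cons, List.takeWhile_cons]
      simp [hq]
      rw [← List.getD_eq_getElem?_getD]
      exact ih

theorem pvAux_dropWhile : ∀ (xs : List String),
    pvAux (xs.dropWhile (fun y => !pvQ y)) = pvAux xs := by
  intro xs
  induction xs with
  | nil => simp
  | cons x xs ih =>
    by_cases hq : pvQ x = true
    · simp [hq]
    · simp only [List.dropWhile_cons]
      simp [hq, pvAux, ih]

theorem pvShift (x : String) (xs : List String) (j : Nat) (hj : j < (pvNidx xs).length) :
    (List.drop (((pvNbounds xs).map (· + 1)).getD j 0) (x :: xs)).take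
        (((pvNbounds xs).map (· + 1)).getD (j + 1) 0 - ((pvNbounds xs).map (· + 1)).getD j 0) =
      (xs.drop ((pvNbounds xs).getD j 0)).take
        ((pvNbounds xs).getD (j + 1) 0 - (pvNbounds xs).getD j 0) := by
  have h1 : j < (pvNbounds xs).length := by simp [pvNbounds]; omega
  have h2 : j + 1 < (pvNbounds xs).length := by simp [pvNbounds]; omega
  rw [pvGetD_map_succ _ _ h1, pvGetD_map_succ _ _ h2, List.drop_succ_cons]
  congr 1
  omega

theorem pvNB_eq_aux : ∀ (xs : List String), pvNB xs = pvAux xs := by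
  intro xs
  induction xs with
  | nil => simp [pvNB, pvNidx, pvAux]
  | cons x xs ih =>
    by_cases hq : pvQ x = true
    · have hn : pvNidx (x :: xs) = 0 :: (pvNidx xs).map (· + 1) := by simp [pvNidx, hq]
      have hb : pvNbounds (x :: xs) = 0 :: (pvNbounds xs).map (· + 1) := by
        simp [pvNbounds, pvNidx, hq]
      have haux : pvAux (x :: xs) =
          (x :: xs.takeWhile (fun y => !pvQ y)) :: pvAux (xs.dropWhile (fun y => !pvQ y)) := by
        rw [pvAux]; simp [hq]
      rw [haux, pvAux_dropWhile xs, ← ih]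
      unfold pvNB
      rw [hn, hb, List.length_cons, List.length_map, List.range_succ_eq_map, List.map_cons,
        List.map_map]
      congr 1
      · -- head group
        rw [List.getD_cons_zero, List.drop_zero, List.getD_cons_succ]
        have hlen : 0 < (pvNbounds xs).length := by simp [pvNbounds]
        rw [pvGetD_map_succ _ _ hlen]
        rw [Nat.sub_zero, List.take_succ_cons, pvHead_take]
      · -- tail groups
        apply List.map_congr_left
        intro j hj
        have hj' : j < (pvNidx xs).length := List.mem_range.mp hj
        simp only [Function.comp]
        rw [List.getD_cons_succ, List.getD_cons_succ]
        exact pvShift x xs j hj'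
    · have hn : pvNidx (x :: xs) = (pvNidx xs).map (· + 1) := by simp [pvNidx, hq]
      have hb : pvNbounds (x :: xs) = (pvNbounds xs).map (· + 1) := by
        simp [pvNbounds, pvNidx, hq]
      have haux : pvAux (x :: xs) = pvAux xs := by rw [pvAux]; simp [hq]
      rw [haux, ← ih]
      unfold pvNB
      rw [hn, hb, List.length_map]
      apply List.map_congr_left
      intro j hj
      exact pvShift x xs j (List.mem_range.mp hj)

-- ===== VERDICT (by name: the statement is the Claim_ definition above) =====
theorem createSets_spec : Claim_equal_createSets := by
  intro xs _
  show createSets xs = createSets_alt xs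
  rw [pvA_eq_aux, pvAlt_eq_NB, pvNB_eq_aux]
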